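-- pv_equiv track=rewrite | github.com/BB31420/char_freq_anal | doublewordcheck.py | generate_combined_pattern
-- ===== SOURCE A (Python) =====
-- def generate_combined_pattern(word1, word2):
--     pattern1, pattern2 = [], []
--     letter_map = {}
--     current_index = 0
--     for letter in word1 + word2:
--         if letter not in letter_map:
--             letter_map[letter] = current_index
--             current_index += 1
--     for letter in word1:
--         pattern1.append(letter_map[letter])
--     for letter in word2:
--         pattern2.append(letter_map[letter])
--     return pattern1, pattern2
-- ===== SOURCE B (Python) =====
-- def generate_combined_pattern(word1, word2):
--     combined = word1 + word2
--     # a letter's code is the number of distinct letters that appear before its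
--     # first occurrence in the combined string: a closed form, no running counter
--     code = {c: len(set(combined[:combined.index(c)])) for c in set(combined)}
--     return [code[c] for c in word1], [code[c] for c in word2]
-- ===== Notes on version B (the rewrite author's own statement) =====
-- stated objective: alternative
-- what changed: Replaces A's incremental counter dict (assign the next index on each first appearance while scanning word1+word2) with a closed form: a letter's code is computed directly as len(set(combined[:combined.index(c)])) — the number of distinct letters before its first occurrence — evaluated once per distinct letter, with no running counter state.
import Mathlib
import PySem

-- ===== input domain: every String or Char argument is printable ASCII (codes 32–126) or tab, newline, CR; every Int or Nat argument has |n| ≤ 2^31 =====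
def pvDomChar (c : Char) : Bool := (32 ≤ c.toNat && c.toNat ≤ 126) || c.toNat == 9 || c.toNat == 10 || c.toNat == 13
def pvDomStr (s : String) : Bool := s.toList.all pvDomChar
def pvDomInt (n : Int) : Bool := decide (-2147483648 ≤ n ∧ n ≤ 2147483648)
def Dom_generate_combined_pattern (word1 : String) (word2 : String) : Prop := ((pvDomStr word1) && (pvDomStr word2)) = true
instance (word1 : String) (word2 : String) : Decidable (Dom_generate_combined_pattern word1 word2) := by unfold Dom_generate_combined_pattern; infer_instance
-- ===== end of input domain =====

-- B replaces A's incremental counter dict with a closed form — a letter's code is the number of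
-- distinct letters strictly before its first occurrence in word1+word2 — computed once per distinct
-- letter via slice+set; objective: alternative (same result, no running counter state).

-- ===== PORT A =====
-- first loop: build letter_map with a running current_index over word1 + word2
def gcpA_buildStep (s : PySem.Dict Char Int × Int) (letter : Char) : PySem.Dict Char Int × Int :=
  if s.1.contains letter then s else (s.1.insert letter s.2, s.2 + 1)

def generate_combined_pattern (word1 : String) (word2 : String) : List Int × List Int :=
  let lm := ((word1.toList ++ word2.toList).foldl gcpA_buildStep (PySem.Dict.empty, 0)).1
  -- letter_map[letter]: every letter of word1/word2 was inserted by the first loop, so the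
  -- default 0 of getD is never used (Python's d[letter] cannot raise here)
  let pattern1 := word1.toList.foldl (fun p letter => p ++ [lm.getD letter 0]) []
  let pattern2 := word2.toList.foldl (fun p letter => p ++ [lm.getD letter 0]) []
  (pattern1, pattern2)

-- ===== PORT B =====
-- len(set(combined[:combined.index(c)])) — c's code as a closed form; combined.index(c)
-- cannot raise (ValueError) here because code is only applied to letters of combined
def gcpB_code (combined : List Char) (c : Char) : Int :=
  PySem.Set.len (PySem.Set.ofList
    (PySem.List.slice combined none (some (((PySem.List.index? combined c).getD 0 : Nat) : Int))))

def generate_combined_pattern_alt (word1 : String) (word2 : String) : List Int × List Int :=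
  let combined := word1.toList ++ word2.toList
  -- {c: len(set(combined[:combined.index(c)])) for c in set(combined)} — the dict is only
  -- looked up afterwards, so the set's iteration order cannot influence the result
  let code := (PySem.Set.ofList combined).foldl
    (fun d c => d.insert c (gcpB_code combined c)) PySem.Dict.empty
  -- code[c] cannot raise (KeyError): every letter of word1/word2 is in set(combined)
  (word1.toList.map (fun c => code.getD c 0), word2.toList.map (fun c => code.getD c 0))

-- ===== PRECONDITION & SPEC =====
def Spec_generate_combined_pattern (word1 : String) (word2 : String) (out : List Int × List Int) : Prop := out = generate_combined_pattern_alt word1 word2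
instance (word1 : String) (word2 : String) (out : List Int × List Int) : Decidable (Spec_generate_combined_pattern word1 word2 out) := by unfold Spec_generate_combined_pattern; infer_instance

-- ===== CLAIM (what is proved, stated in full; the proofs are below) =====
def Claim_equal_generate_combined_pattern : Prop := ∀ (word1 : String) (word2 : String), Dom_generate_combined_pattern word1 word2 → Spec_generate_combined_pattern word1 word2 (generate_combined_pattern word1 word2)

-- ===== LEMMAS AND PROOFS =====

-- the pure dict part of A's first loop (counter dropped): insert a new key with value = current size
def dmUpd (m : PySem.Dict Char Int) (c : Char) : PySem.Dict Char Int :=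
  if m.contains c then m else m.insert c (m.size : Int)

-- A's counter loop computes the same map as folding dmUpd, the counter tracking the size.
theorem gcpA_fold_eq (xs : List Char) : ∀ (m : PySem.Dict Char Int),
    xs.foldl gcpA_buildStep (m, (m.size : Int)) =
      (xs.foldl dmUpd m, ((xs.foldl dmUpd m).size : Int)) := by
  induction xs with
  | nil => intro m; rfl
  | cons c xs ih =>
    intro m
    by_cases h : m.contains c = true
    · simp only [List.foldl_cons, gcpA_buildStep, dmUpd, h, if_true]
      exact ih m
    · simp only [List.foldl_cons, gcpA_buildStep, dmUpd, h]
      have hs : ((m.insert c (m.size : Int)).size : Int) = (m.size : Int) + 1 := by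
        rw [PySem.Dict.size_insert]
        simp [h]
      rw [← hs]
      exact ih (m.insert c (m.size : Int))

-- the dmUpd fold tracks the set of letters seen so far: same membership, size = set's length
theorem dm_fold_inv (ys : List Char) : ∀ (m : PySem.Dict Char Int) (s : PySem.Set Char),
    (∀ x, m.contains x = s.contains x) → m.size = s.length →
    (∀ x, (ys.foldl dmUpd m).contains x = (PySem.Set.update s ys).contains x) ∧
      (ys.foldl dmUpd m).size = (PySem.Set.update s ys).length := by
  induction ys with
  | nil => intro m s h1 h2; exact ⟨h1, h2⟩
  | cons c ys ih =>
    intro m s h1 h2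
    rw [List.foldl_cons, PySem.Set.update_cons]
    by_cases hc : m.contains c = true
    · have hsc : s.contains c = true := by rw [← h1]; exact hc
      have : PySem.Set.add s c = s := by
        simp [PySem.Set.add, (PySem.Set.contains_iff s c).1 hsc]
      rw [this]
      simp only [dmUpd, hc, if_true]
      exact ih m s h1 h2
    · have hc' : m.contains c = false := by simpa using hc
      have hsc : s.contains c = false := by rw [← h1]; exact hc'
      have hns : c ∉ s := fun h => by
        rw [(PySem.Set.contains_iff s c).2 h] at hsc; simp at hsc
      have hadd : PySem.Set.add s c = s ++ [c] := by simp [PySem.Set.add, hns]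
      rw [hadd]
      have hstep : dmUpd m c = m.insert c (m.size : Int) := by simp [dmUpd, hc]
      rw [hstep]
      apply ih
      · intro x
        rw [PySem.Dict.contains_insert]
        simp only [PySem.Set.contains_eq_listContains, List.contains_append,
          List.contains_cons, List.elem_nil, Bool.or_false]
        rw [← PySem.Set.contains_eq_listContains, h1, Bool.or_comm]
      · rw [PySem.Dict.size_insert]
        simp [hc', h2]

-- a binding present in m survives the rest of the dmUpd fold (dmUpd never overwrites)
theorem dm_get?_preserved (xs : List Char) : ∀ (m : PySem.Dict Char Int) (c : Char) (v : Int),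
    m.get? c = some v → (xs.foldl dmUpd m).get? c = some v := by
  induction xs with
  | nil => intro m c v h; exact h
  | cons c' xs ih =>
    intro m c v h
    simp only [List.foldl_cons]
    apply ih
    unfold dmUpd
    by_cases hc : m.contains c' = true
    · simp [hc, h]
    · simp only [hc, if_false, Bool.false_eq_true]
      by_cases he : c = c'
      · subst he
        rw [(PySem.Dict.get?_eq_none_iff_contains m c).2 (by simpa using hc)] at h
        exact absurd h (by simp)
      · rw [PySem.Dict.get?_insert_of_ne m ((m.size : Int)) he]; exact h

-- the heart of the equivalence: A's stored counter value IS B's closed form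
theorem dm_getD_eq_code (combined : List Char) (c : Char) (hmem : c ∈ combined) :
    (combined.foldl dmUpd PySem.Dict.empty).getD c 0 = gcpB_code combined c := by
  obtain ⟨k, hk⟩ := Option.isSome_iff_exists.1
    ((PySem.List.index?_isSome_iff combined c).2 hmem)
  obtain ⟨pre, suf, heq, hlen, hnot⟩ := (PySem.List.index?_eq_some_iff combined c k).1 hk
  -- B's side: the slice is exactly pre
  have hcode : gcpB_code combined c = ((PySem.Set.ofList pre).length : Int) := by
    unfold gcpB_code
    rw [hk, Option.getD_some, PySem.List.slice_to_natCast, ← hlen, heq,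
      List.take_left' rfl]
    simp [PySem.Set.len]
  -- A's side: the fold over pre has never seen c and has size = (Set.ofList pre).length
  have hinv := dm_fold_inv pre PySem.Dict.empty PySem.Set.empty
    (fun _ => rfl) rfl
  rw [show PySem.Set.update PySem.Set.empty pre = PySem.Set.ofList pre from rfl] at hinv
  set m0 := pre.foldl dmUpd PySem.Dict.empty with hm0
  have hnc : m0.contains c = false := by
    rw [hinv.1 c]
    by_contra h
    exact hnot ((PySem.Set.mem_ofList pre c).1
      ((PySem.Set.contains_iff _ c).1 (by simpa using h)))
  have hstep : dmUpd m0 c = m0.insert c (m0.size : Int) := by simp [dmUpd, hnc]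
  have hget : (combined.foldl dmUpd PySem.Dict.empty).get? c = some (m0.size : Int) := by
    rw [heq, List.foldl_append, List.foldl_cons, ← hm0, hstep]
    exact dm_get?_preserved suf _ c _ (PySem.Dict.get?_insert_self m0 c _)
  rw [PySem.Dict.getD_eq_get?_getD, hget, Option.getD_some, hcode, hinv.2]

-- B's dict over set(combined) maps every letter of combined to gcpB_code combined c
theorem code_dict_getD (combined : List Char) (c : Char) (hmem : c ∈ combined) :
    ((PySem.Set.ofList combined).foldl
      (fun d c => d.insert c (gcpB_code combined c)) PySem.Dict.empty).getD c 0 =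
      gcpB_code combined c := by
  have hitems := PySem.Dict.items_foldl_insert_fresh (PySem.Set.ofList combined)
    (fun c => c) (fun c => gcpB_code combined c) PySem.Dict.empty
    (fun a _ => PySem.Dict.contains_empty a)
    (by rw [List.map_id']; exact PySem.Set.nodup_ofList combined)
  apply PySem.Dict.getD_of_mem_items
  · rw [hitems]
    simp only [PySem.Dict.empty, List.nil_append, List.mem_map]
    exact ⟨c, (PySem.Set.mem_ofList combined c).2 hmem, rfl⟩
  · exact PySem.Dict.nodup_keys_foldl_insert _ _ _ PySem.Dict.nodup_keys_empty

-- ===== VERDICT (by name: the statement is the Claim_ definition above) =====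
theorem generate_combined_pattern_spec : Claim_equal_generate_combined_pattern := by
  intro word1 word2 _
  unfold Spec_generate_combined_pattern generate_combined_pattern generate_combined_pattern_alt
  set combined := word1.toList ++ word2.toList with hcomb
  have hM := gcpA_fold_eq combined PySem.Dict.empty
  rw [show ((PySem.Dict.empty : PySem.Dict Char Int).size : Int) = 0 by
        rw [PySem.Dict.size_empty]; rfl] at hM
  simp only [hM]
  rw [PySem.List.foldl_append_singleton_eq_map, PySem.List.foldl_append_singleton_eq_map]
  simp only [List.nil_append]
  refine Prod.ext ?_ ?_ <;> (apply List.map_congr_left; intro c hc)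
  · rw [dm_getD_eq_code combined c (by rw [hcomb]; exact List.mem_append_left _ hc),
      code_dict_getD combined c (by rw [hcomb]; exact List.mem_append_left _ hc)]
  · rw [dm_getD_eq_code combined c (by rw [hcomb]; exact List.mem_append_right _ hc),
      code_dict_getD combined c (by rw [hcomb]; exact List.mem_append_right _ hc)]
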